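-- pv_equiv track=rewrite | github.com/DFKI-NLP/cross-nvc | src/models/embeddings.py | get_subtoken_indices
-- ===== SOURCE A (Python) =====
-- def get_subtoken_indices(tokenized_sentence, subtokens):
--     """Get the indices of the subtokens.
--
--     Since some words are split up in subtokens, we need to find all
--     indices of these subtokens in the sentence.
--     Args:
--         tokens: list of str
--                 The tokenized version of a sentence.
--         subtokens:  list of str
--                     The tokenized version of a word.
--     Returns:
--         list (of list) of ints
--         A list of indices for every occurrence of the subtokens
--         in the sentence.
--     """
--     # find possible starting positions of the target word
--     starting_positions = [
--         i for i, x in enumerate(tokenized_sentence) if x == subtokens[0]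
--     ]
--     num_subtokens = len(subtokens)
--
--     # if the target word is not split up, just return its index
--     if len(subtokens) == 1:
--
--         return [starting_positions]
--
--     all_idx_of_subtokens = []
--
--     # otherwise, iterate over all possible starting positions and
--     # check if the following indices/(sub)tokens are part of the
--     # target word
--     for idx in starting_positions:
--         idx_of_subtokens = []
--         j = 1
--         start = idx
--         while j <= num_subtokens - 1:
--
--             if tokenized_sentence[start + j] == subtokens[j]:
--                 idx_of_subtokens.append(idx)
--                 idx_of_subtokens.append(start + j)
--                 j += 1
--                 continue
--             else:
--                 break
--         if idx_of_subtokens: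
--             all_idx_of_subtokens.append(idx_of_subtokens)
--
--     return all_idx_of_subtokens
-- ===== SOURCE B (Python) =====
-- def get_subtoken_indices(tokenized_sentence, subtokens):
--     """Z-algorithm over pattern + sentinel + sentence: one pass computes the
--     prefix-match length of the subtokens at every sentence position (reusing
--     earlier match lengths); the index lists are rebuilt from those lengths."""
--     if len(subtokens) == 1:
--         return [[i for i, x in enumerate(tokenized_sentence) if x == subtokens[0]]]
--     sep = object()  # equal to no string, so matches can never cross it
--     s = list(subtokens) + [sep] + list(tokenized_sentence)
--     n = len(s)
--     z = [0] * n
--     l = r = 0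
--     for i in range(1, n):
--         k = min(r - i, z[i - l]) if i < r else 0
--         while i + k < n and s[i + k] == s[k]:
--             k += 1
--         z[i] = k
--         if i + k > r:
--             l, r = i, i + k
--     m = len(subtokens)
--     result = []
--     for i in range(len(tokenized_sentence)):
--         p = z[m + 1 + i]
--         if p >= 2:
--             result.append([v for t in range(1, p) for v in (i, i + t)])
--     return result
-- ===== Notes on version B (the rewrite author's own statement) =====
-- stated objective: alternative
-- what changed: B replaces A's per-start rescanning (collect candidate starts, then re-compare the window at each start token by token) with the Z-algorithm run once over subtokens + sentinel + sentence, which yields the prefix-match length at every position in a single pass by reusing previously computed match lengths; the index lists are then rebuilt arithmetically from those lengths.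
import Mathlib
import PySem

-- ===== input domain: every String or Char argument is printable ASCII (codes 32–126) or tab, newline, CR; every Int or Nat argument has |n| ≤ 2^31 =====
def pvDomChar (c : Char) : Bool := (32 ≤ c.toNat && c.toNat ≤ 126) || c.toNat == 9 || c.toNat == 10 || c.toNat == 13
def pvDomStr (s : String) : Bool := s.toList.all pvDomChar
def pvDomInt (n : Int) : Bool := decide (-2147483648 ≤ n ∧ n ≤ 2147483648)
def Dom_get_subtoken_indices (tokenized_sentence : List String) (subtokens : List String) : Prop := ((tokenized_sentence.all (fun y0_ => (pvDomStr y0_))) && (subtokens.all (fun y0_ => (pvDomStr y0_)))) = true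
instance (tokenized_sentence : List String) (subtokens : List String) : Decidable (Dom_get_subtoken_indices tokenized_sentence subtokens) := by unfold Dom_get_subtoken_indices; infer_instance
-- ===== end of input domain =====

-- B replaces A's per-start rescanning with one Z-algorithm pass over
-- subtokens + sentinel + sentence (the prefix-match length at every position, computed by
-- reusing earlier match lengths), then rebuilds the index lists from those lengths.
-- Return values only; neither program mutates its arguments.

-- ===== PORT A =====
-- A's inner `while` loop: j counts up while j <= num_subtokens - 1 (fuel = the remaining
-- iterations); a `none` from pyGet? is where Python raises IndexError (excluded by Pre_).
def aStep (sent subs : List String) (idx : Int) : Nat → Nat → List Int → List Int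
  | 0, _, acc => acc
  | f + 1, j, acc =>
    match PySem.List.pyGet? sent (idx + (j : Int)), PySem.List.pyGet? subs (j : Int) with
    | some a, some b =>
        if a == b then aStep sent subs idx f (j + 1) (acc ++ [idx, idx + (j : Int)]) else acc
    | _, _ => acc

def get_subtoken_indices (tokenized_sentence : List String) (subtokens : List String) : List (List Int) :=
  let starting : List Int :=
    ((PySem.List.enumerate tokenized_sentence).filter (fun p => p.2 == subtokens.headD "")).map (fun p => p.1)
  let m := subtokens.length
  if m == 1 then [starting]
  else
    starting.foldl (fun all idx =>
      let l := aStep tokenized_sentence subtokens idx (m - 1) 1 []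
      if l == [] then all else all ++ [l]) []

-- ===== PORT B =====
-- B's inner `while` loop of the Z-algorithm: extend the match length k at position i by
-- direct comparison (getD is exact here: the guard proves both indices in range, and the
-- Python sentinel `object()` that equals no string is ported as `none`).
-- fuel = s.length: the loop runs at most s.length times (k strictly increases and
-- the guard needs i + k < s.length), so the fuel never runs out
def zExt (s : List (Option String)) (i : Nat) : Nat → Nat → Nat
  | 0, k => k
  | f + 1, k =>
    if i + k < s.length ∧ s.getD (i + k) none = s.getD k none then zExt s i f (k + 1) else k

-- one iteration of B's `for i in range(1, n)` loop over the state (z, l, r)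
def zStep (s : List (Option String)) (st : List Nat × Nat × Nat) (i : Nat) : List Nat × Nat × Nat :=
  let k0 := if i < st.2.2 then min (st.2.2 - i) (st.1.getD (i - st.2.1) 0) else 0
  let k := zExt s i s.length k0
  if st.2.2 < i + k then (st.1 ++ [k], i, i + k) else (st.1 ++ [k], st.2.1, st.2.2)

def zArray (s : List (Option String)) : List Nat :=
  ((List.range' 1 (s.length - 1)).foldl (zStep s) ([0], 0, 0)).1

def get_subtoken_indices_alt (tokenized_sentence : List String) (subtokens : List String) : List (List Int) :=
  if subtokens.length == 1 then
    [((PySem.List.enumerate tokenized_sentence).filter (fun p => p.2 == subtokens.headD "")).map (fun p => p.1)]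
  else
    let s : List (Option String) := subtokens.map some ++ [none] ++ tokenized_sentence.map some
    let z := zArray s
    let m := subtokens.length
    (List.range tokenized_sentence.length).foldl (fun res i =>
      let p := z.getD (m + 1 + i) 0
      if 2 ≤ p then
        res ++ [(PySem.List.pyRange 1 ((p : Nat) : Int) 1).flatMap (fun t => [(i : Int), (i : Int) + t])]
      else res) []

-- ===== PRECONDITION & SPEC =====
-- Bool test: at position i a match of the subtokens starts, stays unbroken to the end of the
-- sentence, yet the window i + len(subtokens) overruns it — there A's
-- `tokenized_sentence[start + j]` raises IndexError.
def overrunAt (sent subs : List String) (i : Nat) : Bool :=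
  (sent.getD i "" == subs.getD 0 "") && decide (sent.length < i + subs.length) &&
    decide (2 ≤ subs.length) &&
    (List.range (sent.length - i)).all (fun k => k == 0 || sent.getD (i + k) "" == subs.getD k "")

-- Pre_ excludes exactly the inputs on which A raises IndexError: empty subtokens with a
-- nonempty sentence (subtokens[0]), and partial matches running off the end of the sentence.
def Pre_get_subtoken_indices (tokenized_sentence : List String) (subtokens : List String) : Prop :=
  (subtokens = [] → tokenized_sentence = []) ∧
    ∀ i ∈ List.range tokenized_sentence.length, overrunAt tokenized_sentence subtokens i = false
instance (tokenized_sentence : List String) (subtokens : List String) : Decidable (Pre_get_subtoken_indices tokenized_sentence subtokens) := by unfold Pre_get_subtoken_indices; infer_instance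

def pvWitness_get_subtoken_indices : List String × List String := (["a", "b", "a", "b", "c"], ["a", "b"])

def Spec_get_subtoken_indices (tokenized_sentence : List String) (subtokens : List String) (out : List (List Int)) : Prop := out = get_subtoken_indices_alt tokenized_sentence subtokens
instance (tokenized_sentence : List String) (subtokens : List String) (out : List (List Int)) : Decidable (Spec_get_subtoken_indices tokenized_sentence subtokens out) := by unfold Spec_get_subtoken_indices; infer_instance

-- ===== CLAIM (what is proved, stated in full; the proofs are below) =====
def Claim_equal_get_subtoken_indices : Prop := ∀ (tokenized_sentence : List String) (subtokens : List String), Dom_get_subtoken_indices tokenized_sentence subtokens → Pre_get_subtoken_indices tokenized_sentence subtokens → Spec_get_subtoken_indices tokenized_sentence subtokens (get_subtoken_indices tokenized_sentence subtokens)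

-- ===== LEMMAS AND PROOFS =====

-- longest common prefix of two lists
def bLcp {α : Type} [DecidableEq α] : List α → List α → Nat
  | a :: u, b :: v => if a = b then bLcp u v + 1 else 0
  | _, _ => 0

def segOf (sent subs : List String) (i : Nat) : List String := (sent.drop i).take subs.length

def lcpAt (sent subs : List String) (i : Nat) : Nat := bLcp (segOf sent subs i) subs

theorem length_segOf (sent subs : List String) (i : Nat) :
    (segOf sent subs i).length = min subs.length (sent.length - i) := by
  simp [segOf]

theorem segOf_get (sent subs : List String) (i t : Nat) (ht : t < subs.length) :
    (segOf sent subs i)[t]? = sent[i + t]? := by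
  simp [segOf, ht, List.getElem?_drop]

theorem aStep_acc (sent subs : List String) (idx : Int) :
    ∀ (f j : Nat) (acc : List Int),
      aStep sent subs idx f j acc = acc ++ aStep sent subs idx f j [] := by
  intro f
  induction f with
  | zero => intro j acc; simp [aStep]
  | succ f ih =>
    intro j acc
    simp only [aStep]
    rcases h1 : PySem.List.pyGet? sent (idx + (j : Int)) with _ | a <;>
      rcases h2 : PySem.List.pyGet? subs (j : Int) with _ | b
    · simp
    · simp
    · simp
    · by_cases hab : (a == b) = true
      · simp only [if_pos hab]
        rw [ih (j + 1) (acc ++ [idx, idx + (j : Int)]), ih (j + 1) ([] ++ [idx, idx + (j : Int)])]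
        simp
      · simp only [if_neg hab]; simp

theorem bLcp_le_left {α : Type} [DecidableEq α] : ∀ u v : List α, bLcp u v ≤ u.length
  | [], v => by simp [bLcp]
  | a :: u, [] => by simp [bLcp]
  | a :: u, b :: v => by
    simp only [bLcp]
    split
    · have := bLcp_le_left u v; simp; omega
    · simp

theorem bLcp_le_right {α : Type} [DecidableEq α] : ∀ u v : List α, bLcp u v ≤ v.length
  | [], v => by simp [bLcp]
  | a :: u, [] => by simp [bLcp]
  | a :: u, b :: v => by
    simp only [bLcp]
    split
    · have := bLcp_le_right u v; simp; omega
    · simp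

theorem bLcp_lt {α : Type} [DecidableEq α] : ∀ (u v : List α) (t : Nat), t < bLcp u v →
    u[t]? = v[t]? ∧ (u[t]?).isSome
  | [], v, t, h => by simp [bLcp] at h
  | a :: u, [], t, h => by simp [bLcp] at h
  | a :: u, b :: v, t, h => by
    simp only [bLcp] at h
    split at h
    · rename_i hab
      cases t with
      | zero => simpa using hab
      | succ t => simpa using bLcp_lt u v t (by omega)
    · omega

theorem bLcp_stop {α : Type} [DecidableEq α] : ∀ (u v : List α), bLcp u v < u.length → bLcp u v < v.length →
    u[bLcp u v]? ≠ v[bLcp u v]?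
  | [], v, h1, h2 => by simp at h1
  | a :: u, [], h1, h2 => by simp at h2
  | a :: u, b :: v, h1, h2 => by
    by_cases hab : a = b
    · simp only [bLcp, if_pos hab, List.length_cons] at *
      simp only [List.getElem?_cons_succ]
      exact bLcp_stop u v (by omega) (by omega)
    · simp only [bLcp, if_neg hab, List.getElem?_cons_zero]
      intro he; apply hab; simpa using he

theorem bLcp_ge {α : Type} [DecidableEq α] : ∀ (u v : List α) (k : Nat),
    (∀ t, t < k → u[t]? = v[t]? ∧ (u[t]?).isSome) → k ≤ bLcp u v
  | u, v, 0, _ => Nat.zero_le _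
  | u, v, k + 1, h => by
    obtain ⟨h0, hs0⟩ := h 0 (Nat.succ_pos _)
    match u, v with
    | [], _ => simp at hs0
    | a :: u, [] => rw [h0] at hs0; simp at hs0
    | a :: u, b :: v =>
      have hab : a = b := by simpa using h0
      have : k ≤ bLcp u v := bLcp_ge u v k (fun t ht => by simpa using h (t + 1) (by omega))
      simp only [bLcp, if_pos hab]
      omega

-- the true Z-value: lcp of s with its suffix at i
def trueZ (s : List (Option String)) (i : Nat) : Nat := bLcp (s.drop i) s

theorem zExt_eq (s : List (Option String)) (i : Nat) :
    ∀ (f k : Nat), k ≤ bLcp (s.drop i) s → bLcp (s.drop i) s ≤ k + f →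
      zExt s i f k = bLcp (s.drop i) s := by
  have hu := bLcp_le_left (s.drop i) s
  have hv := bLcp_le_right (s.drop i) s
  have hlen : (s.drop i).length = s.length - i := by simp
  intro f
  induction f with
  | zero =>
    intro k h1 h2
    have hk : k = bLcp (s.drop i) s := by omega
    simp [zExt, hk]
  | succ f ih =>
    intro k h1 h2
    rcases Nat.lt_or_ge k (bLcp (s.drop i) s) with hlt | hge
    · obtain ⟨heq, hsome⟩ := bLcp_lt (s.drop i) s k hlt
      rw [List.getElem?_drop] at heq hsome
      have h1' : i + k < s.length := by
        by_contra hc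
        rw [List.getElem?_eq_none_iff.mpr (by omega)] at hsome
        simp at hsome
      have hcond : i + k < s.length ∧ s.getD (i + k) none = s.getD k none := by
        refine ⟨h1', ?_⟩
        rw [List.getD_eq_getElem?_getD, List.getD_eq_getElem?_getD, heq]
      simp only [zExt]
      rw [if_pos hcond]
      exact ih (k + 1) (by omega) (by omega)
    · have hke : k = bLcp (s.drop i) s := by omega
      have hneg : ¬ (i + k < s.length ∧ s.getD (i + k) none = s.getD k none) := by
        rintro ⟨c1, c2⟩
        have hmis := bLcp_stop (s.drop i) s (by omega) (by omega)
        rw [← hke] at hmis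
        apply hmis
        rw [List.getElem?_drop]
        rw [List.getD_eq_getElem?_getD, List.getD_eq_getElem?_getD] at c2
        rw [List.getElem?_eq_getElem c1,
          List.getElem?_eq_getElem (show k < s.length by omega)] at c2 ⊢
        simpa using c2
      simp only [zExt]
      rw [if_neg hneg]
      exact hke

-- the loop invariant of B's Z pass after processing i = 1 .. j
def zInv (s : List (Option String)) (j : Nat) (st : List Nat × Nat × Nat) : Prop :=
  st.1 = 0 :: (List.range' 1 j).map (fun t => trueZ s t) ∧
  (st.2.2 ≤ j + 1 ∨ (1 ≤ st.2.1 ∧ st.2.1 < j + 1 ∧ st.2.2 - st.2.1 ≤ trueZ s st.2.1))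

theorem zget (s : List (Option String)) (j t : Nat) (h1 : 1 ≤ t) (h2 : t ≤ j) :
    (0 :: (List.range' 1 j).map (fun t => trueZ s t)).getD t 0 = trueZ s t := by
  obtain ⟨t', rfl⟩ : ∃ t', t = t' + 1 := ⟨t - 1, by omega⟩
  have hlt : t' < j := by omega
  simp [List.getD_eq_getElem?_getD, hlt]
  rw [Nat.add_comm]

theorem drop_length_le (s : List (Option String)) (i : Nat) :
    bLcp (s.drop i) s ≤ s.length := by
  have h1 := bLcp_le_left (s.drop i) s
  have h2 : (s.drop i).length ≤ s.length := by simp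
  omega

theorem zStep_inv (s : List (Option String)) (j : Nat) (st : List Nat × Nat × Nat)
    (hinv : zInv s j st) : zInv s (j + 1) (zStep s st (j + 1)) := by
  obtain ⟨hz, hw⟩ := hinv
  have hkey : zExt s (j + 1) s.length
      (if j + 1 < st.2.2 then min (st.2.2 - (j + 1)) (st.1.getD (j + 1 - st.2.1) 0) else 0) =
      trueZ s (j + 1) := by
    by_cases hir : j + 1 < st.2.2
    · rcases hw with hle | ⟨hl1, hli, hrl⟩
      · omega
      · have hzg : st.1.getD (j + 1 - st.2.1) 0 = trueZ s (j + 1 - st.2.1) := by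
          rw [hz]; exact zget s j _ (by omega) (by omega)
        rw [if_pos hir, hzg]
        have hb : min (st.2.2 - (j + 1)) (trueZ s (j + 1 - st.2.1)) ≤
            bLcp (s.drop (j + 1)) s := by
          apply bLcp_ge
          intro t ht
          have ht1 : t < trueZ s (j + 1 - st.2.1) := by omega
          have ht2 : t < st.2.2 - (j + 1) := by omega
          obtain ⟨he1, hs1⟩ := bLcp_lt (s.drop (j + 1 - st.2.1)) s t ht1
          rw [List.getElem?_drop] at he1 hs1
          have ht3 : (j + 1 - st.2.1) + t < bLcp (s.drop st.2.1) s := by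
            have hrl' : st.2.2 - st.2.1 ≤ bLcp (s.drop st.2.1) s := hrl
            omega
          obtain ⟨he2, hs2⟩ := bLcp_lt (s.drop st.2.1) s ((j + 1 - st.2.1) + t) ht3
          rw [List.getElem?_drop] at he2 hs2
          have harith : st.2.1 + ((j + 1 - st.2.1) + t) = (j + 1) + t := by omega
          rw [harith] at he2 hs2
          refine ⟨?_, ?_⟩
          · rw [List.getElem?_drop, he2, he1]
          · rw [List.getElem?_drop, he2]; exact hs1
        exact zExt_eq s (j + 1) s.length _ hb
          (by have := drop_length_le s (j + 1); omega)
    · rw [if_neg hir]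
      exact zExt_eq s (j + 1) s.length 0 (Nat.zero_le _)
        (by have := drop_length_le s (j + 1); omega)
  unfold zStep
  simp only []
  rw [hkey]
  have hz' : st.1 ++ [trueZ s (j + 1)] =
      0 :: (List.range' 1 (j + 1)).map (fun t => trueZ s t) := by
    rw [hz, List.range'_concat]
    simp [Nat.add_comm 1 j]
  by_cases hbr : st.2.2 < (j + 1) + trueZ s (j + 1)
  · rw [if_pos hbr]
    exact ⟨hz', Or.inr ⟨(by omega : 1 ≤ j + 1), (by omega : j + 1 < j + 1 + 1),
      (by omega : (j + 1) + trueZ s (j + 1) - (j + 1) ≤ trueZ s (j + 1))⟩⟩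
  · rw [if_neg hbr]
    refine ⟨hz', ?_⟩
    rcases hw with hle | ⟨hl1, hli, hrl⟩
    · exact Or.inl (by omega : st.2.2 ≤ j + 1 + 1)
    · exact Or.inr ⟨hl1, (by omega : st.2.1 < j + 1 + 1), hrl⟩

theorem zFold_inv (s : List (Option String)) :
    ∀ j, zInv s j ((List.range' 1 j).foldl (zStep s) ([0], 0, 0)) := by
  intro j
  induction j with
  | zero => exact ⟨rfl, Or.inl (Nat.zero_le 1)⟩
  | succ j ih =>
    rw [List.range'_concat, List.foldl_append, List.foldl_cons, List.foldl_nil,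
      show 1 + 1 * j = j + 1 by omega]
    exact zStep_inv s j _ ih

theorem bLcp_take {α : Type} [DecidableEq α] : ∀ (u v : List α), bLcp (u.take v.length) v = bLcp u v
  | [], v => by simp
  | a :: u, [] => by simp [bLcp]
  | a :: u, b :: v => by
    simp only [List.length_cons, List.take_succ_cons, bLcp]
    split
    · rw [bLcp_take u v]
    · rfl

theorem bLcp_opt : ∀ (u v : List String) (w : List (Option String)),
    bLcp (u.map some) (v.map some ++ none :: w) = bLcp u v
  | [], v, w => by cases v <;> simp [bLcp]
  | a :: u, [], w => by simp [bLcp]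
  | a :: u, b :: v, w => by
    simp only [List.map_cons, List.cons_append, bLcp]
    by_cases hab : a = b
    · rw [if_pos (by simpa using hab), if_pos hab, bLcp_opt u v w]
    · rw [if_neg (by simpa using hab), if_neg hab]

-- the combined sequence's Z value at a sentence position is the match length there
theorem trueZ_combined (sent subs : List String) (i : Nat) :
    trueZ (subs.map some ++ [none] ++ sent.map some) (subs.length + 1 + i) = lcpAt sent subs i := by
  unfold trueZ
  have hre : subs.map some ++ [none] ++ sent.map some =
      subs.map some ++ (none :: sent.map some) := by simp
  have hn : subs.length + 1 + i = (subs.map some).length + (1 + i) := by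
    simp; omega
  rw [hre, hn]
  have hdrop : (subs.map some ++ (none :: sent.map some)).drop
      ((subs.map some).length + (1 + i)) = (sent.drop i).map some := by
    rw [List.drop_append]
    simp [Nat.add_comm 1 i, List.map_drop]
  rw [hdrop, bLcp_opt]
  unfold lcpAt segOf
  rw [bLcp_take]

def FA (sent subs : List String) (k : Nat) : List Int :=
  aStep sent subs (k : Int) (subs.length - 1) 1 []

def GB (sent subs : List String) (k : Nat) : List Int :=
  (PySem.List.pyRange 1 ((lcpAt sent subs k : Nat) : Int) 1).flatMap
    (fun t => [(k : Int), (k : Int) + t])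

theorem core (sent subs : List String) (i : Nat)
    (hstop : lcpAt sent subs i = subs.length ∨
      (lcpAt sent subs i < (segOf sent subs i).length ∧ lcpAt sent subs i < subs.length)) :
    ∀ (f j : Nat), 1 ≤ j → j + f = subs.length → j ≤ lcpAt sent subs i →
      aStep sent subs (i : Int) f j [] =
        (PySem.List.pyRange (j : Int) ((lcpAt sent subs i : Nat) : Int) 1).flatMap
          (fun t => [(i : Int), (i : Int) + t]) := by
  intro f
  induction f with
  | zero =>
    intro j h1 h2 h3
    have hle : lcpAt sent subs i ≤ subs.length := bLcp_le_right _ _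
    have : j = lcpAt sent subs i := by omega
    subst this
    rw [PySem.List.pyRange_one_eq_nil (le_refl _)]
    simp [aStep]
  | succ f ih =>
    intro j h1 h2 h3
    have hjm : j < subs.length := by omega
    have hcast : (i : Int) + (j : Int) = ((i + j : Nat) : Int) := by push_cast; ring
    by_cases hjl : j < lcpAt sent subs i
    · obtain ⟨heq, hsome⟩ := bLcp_lt _ _ j hjl
      obtain ⟨b, hb⟩ := Option.isSome_iff_exists.mp hsome
      have hsub : subs[j]? = some b := by rw [← heq]; exact hb
      have hsent : sent[i + j]? = some b := by
        rw [← segOf_get sent subs i j hjm]; exact hb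
      have hlhs : PySem.List.pyGet? sent ((i : Int) + (j : Int)) = some b := by
        rw [hcast, PySem.List.pyGet?_natCast]; exact hsent
      have hrhs : PySem.List.pyGet? subs ((j : Nat) : Int) = some b := by
        rw [PySem.List.pyGet?_natCast]; exact hsub
      simp only [aStep, hlhs, hrhs, beq_self_eq_true, if_pos]
      rw [aStep_acc]
      rw [ih (j + 1) (by omega) (by omega) (by omega)]
      have hlt : (j : Int) < ((lcpAt sent subs i : Nat) : Int) := by exact_mod_cast hjl
      rw [PySem.List.pyRange_one_cons hlt]
      simp only [List.flatMap_cons]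
      have : (j : Int) + 1 = ((j + 1 : Nat) : Int) := by push_cast; ring
      rw [this]
      simp
    · have hje : j = lcpAt sent subs i := by omega
      have hstop' : lcpAt sent subs i < (segOf sent subs i).length ∧
          lcpAt sent subs i < subs.length := by
        rcases hstop with h | h
        · omega
        · exact h
      have hseg : j < (segOf sent subs i).length := by omega
      have hmis : (segOf sent subs i)[j]? ≠ subs[j]? := by
        rw [hje]; exact bLcp_stop _ _ hstop'.1 hstop'.2
      have ha : (segOf sent subs i)[j]? = some ((segOf sent subs i)[j]'hseg) :=
        List.getElem?_eq_getElem hseg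
      have hb : subs[j]? = some (subs[j]'hjm) := List.getElem?_eq_getElem hjm
      have hsent : sent[i + j]? = some ((segOf sent subs i)[j]'hseg) := by
        rw [← segOf_get sent subs i j hjm]; exact ha
      have hab : ¬ (((segOf sent subs i)[j]'hseg) == (subs[j]'hjm)) = true := by
        intro h
        apply hmis
        rw [ha, hb]
        simp at h
        rw [h]
      have hlhs : PySem.List.pyGet? sent ((i : Int) + (j : Int)) =
          some ((segOf sent subs i)[j]'hseg) := by
        rw [hcast, PySem.List.pyGet?_natCast]; exact hsent
      have hrhs : PySem.List.pyGet? subs ((j : Nat) : Int) = some (subs[j]'hjm) := by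
        rw [PySem.List.pyGet?_natCast]; exact hb
      simp only [aStep, hlhs, hrhs, if_neg hab]
      rw [hje, PySem.List.pyRange_one_eq_nil (le_refl _)]
      simp

theorem hstop_of_pre (sent subs : List String)
    (hPre : ∀ i ∈ List.range sent.length, overrunAt sent subs i = false)
    (i : Nat) (hi : i < sent.length) (hm : 2 ≤ subs.length) :
    lcpAt sent subs i = subs.length ∨
      (lcpAt sent subs i < (segOf sent subs i).length ∧ lcpAt sent subs i < subs.length) := by
  have hu : lcpAt sent subs i ≤ (segOf sent subs i).length := bLcp_le_left _ _
  have hv : lcpAt sent subs i ≤ subs.length := bLcp_le_right _ _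
  by_cases hlm : lcpAt sent subs i = subs.length
  · exact Or.inl hlm
  · right
    have hlm' : lcpAt sent subs i < subs.length := lt_of_le_of_ne hv hlm
    refine ⟨?_, hlm'⟩
    by_contra hge
    have hleq : lcpAt sent subs i = (segOf sent subs i).length := by omega
    have hlen := length_segOf sent subs i
    have hni : lcpAt sent subs i = sent.length - i := by omega
    have hpos : 1 ≤ lcpAt sent subs i := by omega
    have hover : overrunAt sent subs i = true := by
      have hget : ∀ k, k < lcpAt sent subs i →
          sent.getD (i + k) "" = subs.getD k "" := by
        intro k hk
        obtain ⟨heq, hsome⟩ := bLcp_lt _ _ k hk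
        have hkm : k < subs.length := by omega
        rw [segOf_get sent subs i k hkm] at heq hsome
        rw [List.getD_eq_getElem?_getD, List.getD_eq_getElem?_getD, heq]
      have h0 : sent.getD i "" = subs.getD 0 "" := by
        have := hget 0 hpos
        simpa using this
      simp only [overrunAt, Bool.and_eq_true, List.all_eq_true, decide_eq_true_eq]
      refine ⟨⟨⟨by rw [List.getD_eq_getElem?_getD, List.getD_eq_getElem?_getD] at h0; simp [h0], by omega⟩, hm⟩, ?_⟩
      intro k hk
      rcases Nat.eq_zero_or_pos k with h | h
      · simp [h]
      · have hk' : k < lcpAt sent subs i := by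
          simp [List.mem_range] at hk; omega
        have hgk := hget k hk'
        rw [List.getD_eq_getElem?_getD, List.getD_eq_getElem?_getD] at hgk
        simp [hgk]
    have := hPre i (List.mem_range.mpr hi)
    rw [hover] at this
    exact absurd this (by simp)

theorem lcp_pos (sent subs : List String) (i : Nat) (hi : i < sent.length)
    (hm : 1 ≤ subs.length) :
    1 ≤ lcpAt sent subs i ↔ sent.getD i "" = subs.getD 0 "" := by
  have hlen := length_segOf sent subs i
  have hseg0 : (segOf sent subs i)[0]? = sent[i]? := by
    have := segOf_get sent subs i 0 (by omega)
    simpa using this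
  constructor
  · intro h
    obtain ⟨heq, hsome⟩ := bLcp_lt _ _ 0 h
    rw [hseg0] at heq
    rw [List.getD_eq_getElem?_getD, List.getD_eq_getElem?_getD, heq]
  · intro h
    by_contra hc
    unfold lcpAt at hc
    have hz : bLcp (segOf sent subs i) subs = 0 := by omega
    have hsegpos : 0 < (segOf sent subs i).length := by
      rw [hlen]; exact lt_min_iff.mpr ⟨by omega, by omega⟩
    have hmis := bLcp_stop (segOf sent subs i) subs (by omega) (by omega)
    rw [hz, hseg0] at hmis
    apply hmis
    rw [List.getElem?_eq_getElem hi, List.getElem?_eq_getElem (by omega : 0 < subs.length)]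
    rw [List.getD_eq_getElem?_getD, List.getD_eq_getElem?_getD] at h
    rw [List.getElem?_eq_getElem hi, List.getElem?_eq_getElem (by omega : 0 < subs.length)] at h
    simpa using h

theorem A_eq (sent subs : List String) (hm1 : ¬ subs.length = 1) :
    get_subtoken_indices sent subs =
      ((List.range sent.length).filter
        (fun k => (sent.getD k "" == subs.headD "") && !(FA sent subs k == []))).map
        (fun k => FA sent subs k) := by
  unfold get_subtoken_indices
  have hm1' : (subs.length == 1) = false := by simpa using hm1
  simp only [hm1', Bool.false_eq_true, if_false]
  rw [PySem.List.enumerate_eq_map_pyRange sent ""]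
  simp only [PySem.List.len_eq, PySem.List.pyRange_zero_natCast, List.map_map]
  rw [List.filter_map, List.map_map]
  have hbody : (fun (all : List (List Int)) (idx : Int) =>
      if aStep sent subs idx (subs.length - 1) 1 [] == [] then all
      else all ++ [aStep sent subs idx (subs.length - 1) 1 []]) =
      (fun all idx =>
        if (!(aStep sent subs idx (subs.length - 1) 1 [] == [])) = true then
          all ++ [aStep sent subs idx (subs.length - 1) 1 []] else all) := by
    funext all idx
    cases aStep sent subs idx (subs.length - 1) 1 [] == []
    · simp
    · simp
  rw [hbody, PySem.List.foldl_append_if]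
  rw [List.filter_map, List.map_map, List.filter_filter]
  simp only [List.nil_append, Function.comp]
  congr 1
  · apply List.filter_congr
    intro k _
    simp [FA, PySem.List.pyGetD_natCast, Bool.and_comm]

theorem B_eq (sent subs : List String) (hm1 : ¬ subs.length = 1) :
    get_subtoken_indices_alt sent subs =
      ((List.range sent.length).filter (fun k => decide (2 ≤ lcpAt sent subs k))).map
        (GB sent subs) := by
  unfold get_subtoken_indices_alt
  have hm1' : (subs.length == 1) = false := by simpa using hm1
  simp only [hm1', Bool.false_eq_true, if_false]
  have hzv : ∀ i, i < sent.length →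
      (zArray (subs.map some ++ [none] ++ sent.map some)).getD (subs.length + 1 + i) 0 =
        lcpAt sent subs i := by
    intro i hi
    have hlen : (subs.map some ++ [none] ++ sent.map some).length =
        subs.length + 1 + sent.length := by simp; omega
    unfold zArray
    obtain ⟨hz, _⟩ := zFold_inv (subs.map some ++ [none] ++ sent.map some)
      ((subs.map some ++ [none] ++ sent.map some).length - 1)
    rw [hz, hlen]
    have : subs.length + 1 + sent.length - 1 = subs.length + sent.length := by omega
    rw [this, zget _ _ _ (by omega) (by omega)]
    exact trueZ_combined sent subs i
  have hext : List.foldl (fun res i =>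
      if 2 ≤ (zArray (subs.map some ++ [none] ++ sent.map some)).getD (subs.length + 1 + i) 0 then
        res ++ [(PySem.List.pyRange 1
          (((zArray (subs.map some ++ [none] ++ sent.map some)).getD (subs.length + 1 + i) 0 : Nat) : Int) 1).flatMap
          (fun t => [(i : Int), (i : Int) + t])]
      else res) [] (List.range sent.length) =
    List.foldl (fun res i => if 2 ≤ lcpAt sent subs i then res ++ [GB sent subs i] else res) []
      (List.range sent.length) := by
    apply List.foldl_ext
    intro res i hi
    rw [hzv i (List.mem_range.mp hi)]
    rfl
  rw [hext, PySem.List.foldl_append_ite (fun k => 2 ≤ lcpAt sent subs k) (GB sent subs)]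
  simp

theorem FA_eq_GB (sent subs : List String) (k : Nat) (hk : k < sent.length)
    (hm2 : 2 ≤ subs.length)
    (hPre2 : ∀ i ∈ List.range sent.length, overrunAt sent subs i = false)
    (hl : 1 ≤ lcpAt sent subs k) :
    FA sent subs k = GB sent subs k := by
  unfold FA GB
  exact core sent subs k (hstop_of_pre sent subs hPre2 k hk hm2) (subs.length - 1) 1
    le_rfl (by omega) hl

theorem GB_nil_iff (sent subs : List String) (k : Nat) :
    GB sent subs k = [] ↔ lcpAt sent subs k ≤ 1 := by
  unfold GB
  constructor
  · intro h
    by_contra hc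
    rw [PySem.List.pyRange_one_cons (by exact_mod_cast (by omega : (1:Nat) < lcpAt sent subs k))] at h
    simp at h
  · intro h
    rw [PySem.List.pyRange_one_eq_nil (by exact_mod_cast h)]
    simp

theorem headD_eq_getD (subs : List String) (h : subs ≠ []) :
    subs.headD "" = subs.getD 0 "" := by
  cases subs with
  | nil => exact absurd rfl h
  | cons a l => rfl

theorem main_eq (sent subs : List String)
    (hPre1 : subs = [] → sent = [])
    (hPre2 : ∀ i ∈ List.range sent.length, overrunAt sent subs i = false) :
    get_subtoken_indices sent subs = get_subtoken_indices_alt sent subs := by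
  by_cases hm1 : subs.length = 1
  · unfold get_subtoken_indices get_subtoken_indices_alt
    have h1 : (subs.length == 1) = true := by simpa using hm1
    simp only [h1, if_true]
  · by_cases hnil : subs = []
    · subst hnil
      have h0 : sent = [] := hPre1 rfl
      subst h0
      rfl
    · have hne : subs ≠ [] := hnil
      have hm2 : 2 ≤ subs.length := by
        have h0 : subs.length ≠ 0 := fun h => hne (List.length_eq_zero_iff.mp h)
        omega
      rw [A_eq sent subs hm1, B_eq sent subs hm1]
      have hcond : ∀ k ∈ List.range sent.length,
          ((sent.getD k "" == subs.headD "") && !(FA sent subs k == [])) =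
            decide (2 ≤ lcpAt sent subs k) := by
        intro k hkmem
        have hk : k < sent.length := List.mem_range.mp hkmem
        rw [headD_eq_getD subs hne]
        by_cases hs0 : sent.getD k "" = subs.getD 0 ""
        · have hs0' := hs0
          rw [List.getD_eq_getElem?_getD, List.getD_eq_getElem?_getD] at hs0'
          have hl : 1 ≤ lcpAt sent subs k := (lcp_pos sent subs k hk (by omega)).mpr hs0
          have hFG := FA_eq_GB sent subs k hk hm2 hPre2 hl
          by_cases h2 : 2 ≤ lcpAt sent subs k
          · have hnn : ¬ GB sent subs k = [] := by
              rw [GB_nil_iff]; omega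
            simp [hs0', hFG, hnn, h2]
          · have hn : GB sent subs k = [] := by
              rw [GB_nil_iff]; omega
            simp [hs0', hFG, hn, h2]
        · have hs0' := hs0
          rw [List.getD_eq_getElem?_getD, List.getD_eq_getElem?_getD] at hs0'
          have hl : ¬ 1 ≤ lcpAt sent subs k := by
            intro h
            exact hs0 ((lcp_pos sent subs k hk (by omega)).mp h)
          simp [hs0', show ¬ 2 ≤ lcpAt sent subs k by omega]
      rw [List.filter_congr hcond]
      apply List.map_congr_left
      intro k hkmem
      rw [List.mem_filter] at hkmem
      obtain ⟨hkr, hkc⟩ := hkmem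
      have h2 : 2 ≤ lcpAt sent subs k := by simpa using hkc
      exact FA_eq_GB sent subs k (List.mem_range.mp hkr) hm2 hPre2 (by omega)

-- ===== VERDICT (by name: the statement is the Claim_ definition above) =====
theorem get_subtoken_indices_spec : Claim_equal_get_subtoken_indices := by
  intro sent subs _ hPre
  unfold Spec_get_subtoken_indices
  exact main_eq sent subs hPre.1 hPre.2
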